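-- pv_equiv track=rewrite | github.com/phuocchung123/SynCat | src/KGGraph/KGGDecompose/motif_decompose.py | find_edges
-- ===== SOURCE A (Python) =====
-- def find_edges(cliques, res_list):
--     """
--     Find edges based on the breaks.
--
--     Args:
--     cliques (List[List[int]]): The list of cliques.
--     res_list (List[Tuple]): BRICS breaks result.
--
--     Returns:
--     List[Tuple[int, int]]: List of edges representing the breaks.
--     """
--     edges = []
--     for bond in res_list:
--         c1, c2 = None, None  # Initialize c1 and c2
--         for c in range(len(cliques)):
--             if bond[0] in cliques[c]:
--                 c1 = c
--             if bond[1] in cliques[c]: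
--                 c2 = c
--         if c1 is not None and c2 is not None:
--             edges.append((c1, c2))
--     for c in range(len(cliques)):
--         for i in range(c + 1, len(cliques)):
--             if set(cliques[c]) & set(cliques[i]):
--                 c1, c2 = c, i
--                 edges.append((c1, c2))
--     return edges
-- ===== SOURCE B (Python) =====
-- def find_edges(cliques, res_list):
--     # node -> index of the LAST clique containing it (one pass, replaces per-bond scans)
--     last = {}
--     for idx, clique in enumerate(cliques):
--         for node in clique:
--             last[node] = idx
--     edges = [(last[a], last[b]) for a, b in res_list if a in last and b in last]
--     # node -> ascending list of distinct clique indices containing it (inverted index)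
--     occ = {}
--     for idx, clique in enumerate(cliques):
--         for node in clique:
--             lst = occ.setdefault(node, [])
--             if not lst or lst[-1] != idx:
--                 lst.append(idx)
--     # clique index c -> set of overlapping clique indices i > c
--     partners = {}
--     for lst in occ.values():
--         for k, c in enumerate(lst):
--             partners.setdefault(c, set()).update(lst[k + 1:])
--     for c in range(len(cliques)):
--         for i in sorted(partners.get(c, set())):
--             edges.append((c, i))
--     return edges
-- ===== Notes on version B (the rewrite author's own statement) =====
-- stated objective: faster
-- what changed: A scans every clique for every bond and intersects every clique pair; B builds a node-to-last-clique dict once for the bond phase and an inverted index node-to-clique-list whose co-occurrence pairs are grouped per first index and emitted in sorted order for the overlap phase.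
import Mathlib
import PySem

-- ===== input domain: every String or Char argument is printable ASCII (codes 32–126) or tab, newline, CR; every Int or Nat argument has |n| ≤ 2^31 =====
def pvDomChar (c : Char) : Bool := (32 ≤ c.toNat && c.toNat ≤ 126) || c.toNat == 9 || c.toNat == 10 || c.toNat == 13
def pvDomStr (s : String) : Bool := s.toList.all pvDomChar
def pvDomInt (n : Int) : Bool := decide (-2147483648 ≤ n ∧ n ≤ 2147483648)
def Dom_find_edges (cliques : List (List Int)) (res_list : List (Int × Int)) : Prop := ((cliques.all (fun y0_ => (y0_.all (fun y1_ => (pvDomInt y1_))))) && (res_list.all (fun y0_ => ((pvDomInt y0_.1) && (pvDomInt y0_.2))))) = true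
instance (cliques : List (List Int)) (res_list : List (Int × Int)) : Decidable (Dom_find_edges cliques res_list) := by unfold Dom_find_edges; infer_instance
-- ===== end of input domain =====

-- B replaces A's per-bond scan over all cliques by a node→last-clique dict built once, and A's
-- pairwise set-intersection double loop by an inverted index node→clique-list whose co-occurrence
-- pairs are collected and emitted per first component in sorted order (objective: faster).

-- ===== PORT A =====
def find_edges (cliques : List (List Int)) (res_list : List (Int × Int)) : List (Int × Int) :=
  let n : Int := (cliques.length : Int)
  let edges : List (Int × Int) := res_list.foldl (fun edges bond =>
    let cs : Option Int × Option Int :=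
      (PySem.List.pyRange 0 n 1).foldl (fun p c =>
        let c1 := if (PySem.List.pyGetD cliques c []).contains bond.1 then some c else p.1
        let c2 := if (PySem.List.pyGetD cliques c []).contains bond.2 then some c else p.2
        (c1, c2)) (none, none)
    match cs with
    | (some c1, some c2) => edges ++ [(c1, c2)]
    | _ => edges) []
  (PySem.List.pyRange 0 n 1).foldl (fun edges c =>
    (PySem.List.pyRange (c + 1) n 1).foldl (fun edges i =>
      if !(PySem.Set.inter (PySem.Set.ofList (PySem.List.pyGetD cliques c []))
            (PySem.Set.ofList (PySem.List.pyGetD cliques i []))).isEmpty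
      then edges ++ [(c, i)] else edges) edges) edges

-- ===== PORT B =====
-- node -> index of the last clique containing it
def pvBLast (cliques : List (List Int)) : PySem.Dict Int Int :=
  (PySem.List.enumerate cliques 0).foldl
    (fun last p => p.2.foldl (fun last node => last.insert node p.1) last) PySem.Dict.empty

-- node -> ascending list of distinct clique indices containing it
def pvBOcc (cliques : List (List Int)) : PySem.Dict Int (List Int) :=
  (PySem.List.enumerate cliques 0).foldl
    (fun occ p => p.2.foldl (fun occ node =>
      let lst := occ.getD node []
      if lst = [] ∨ lst.getLast? ≠ some p.1 then occ.insert node (lst ++ [p.1]) else occ) occ)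
    PySem.Dict.empty

-- clique index c -> set of overlapping clique indices i > c
def pvBPartners (occ : PySem.Dict Int (List Int)) : PySem.Dict Int (PySem.Set Int) :=
  occ.values.foldl (fun pd lst =>
    (PySem.List.enumerate lst 0).foldl (fun pd q =>
      pd.modify q.2 [] (fun s => PySem.Set.update s (PySem.List.slice lst (some (q.1 + 1)) none))) pd)
    PySem.Dict.empty

def find_edges_alt (cliques : List (List Int)) (res_list : List (Int × Int)) : List (Int × Int) :=
  let last := pvBLast cliques
  let edges : List (Int × Int) := res_list.filterMap (fun bond =>
    if last.contains bond.1 && last.contains bond.2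
    then some (last.getD bond.1 0, last.getD bond.2 0) else none)
  let pd := pvBPartners (pvBOcc cliques)
  (PySem.List.pyRange 0 (cliques.length : Int) 1).foldl (fun edges c =>
    (PySem.List.sorted (pd.getD c []) (fun x => x) false).foldl
      (fun edges i => edges ++ [(c, i)]) edges) edges

-- ===== PRECONDITION & SPEC =====
def Spec_find_edges (cliques : List (List Int)) (res_list : List (Int × Int)) (out : List (Int × Int)) : Prop := out = find_edges_alt cliques res_list
instance (cliques : List (List Int)) (res_list : List (Int × Int)) (out : List (Int × Int)) : Decidable (Spec_find_edges cliques res_list out) := by unfold Spec_find_edges; infer_instance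

-- ===== CLAIM (what is proved, stated in full; the proofs are below) =====
def Claim_equal_find_edges : Prop := ∀ (cliques : List (List Int)) (res_list : List (Int × Int)), Dom_find_edges cliques res_list → Spec_find_edges cliques res_list (find_edges cliques res_list)

-- ===== LEMMAS AND PROOFS =====

-- a fold whose state is a pair of independently-updated components splits componentwise
theorem pv_foldl_pair {γ α β : Type} (f : α → γ → α) (g : β → γ → β) :
    ∀ (l : List γ) (p : α × β),
      l.foldl (fun p c => (f p.1 c, g p.2 c)) p = (l.foldl f p.1, l.foldl g p.2) := by
  intro l
  induction l with
  | nil => intro p; rfl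
  | cons c l ih => intro p; simpa using ih (f p.1 c, g p.2 c)

theorem pv_last_inner (i x : Int) :
    ∀ (cl : List Int) (d : PySem.Dict Int Int),
      (cl.foldl (fun d node => d.insert node i) d).get? x
        = if x ∈ cl then some i else d.get? x := by
  intro cl
  induction cl with
  | nil => intro d; simp
  | cons node rest ih =>
    intro d
    simp only [List.foldl_cons, ih, PySem.Dict.get?_insert, List.mem_cons]
    by_cases hx : x ∈ rest
    · simp [hx]
    · by_cases hn : x = node <;> simp [hx, hn]

theorem pv_last_outer (x : Int) :
    ∀ (E : List (Int × List Int)) (d : PySem.Dict Int Int),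
      (E.foldl (fun d p => p.2.foldl (fun d node => d.insert node p.1) d) d).get? x
        = E.foldl (fun acc p => if x ∈ p.2 then some p.1 else acc) (d.get? x) := by
  intro E
  induction E with
  | nil => intro d; rfl
  | cons p E ih =>
    intro d
    simp only [List.foldl_cons, ih, pv_last_inner]

theorem pv_bond_lookup (cliques : List (List Int)) (x : Int) :
    (PySem.List.pyRange 0 (cliques.length : Int) 1).foldl
        (fun acc c => if (PySem.List.pyGetD cliques c []).contains x then some c else acc) none
      = (pvBLast cliques).get? x := by
  rw [pvBLast, pv_last_outer, PySem.List.enumerate_eq_map_pyRange cliques [], List.foldl_map]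
  simp

theorem pv_occ_inner (i x : Int) :
    ∀ (cl : List Int) (occ : PySem.Dict Int (List Int)),
      ((cl.foldl (fun occ node =>
          let lst := occ.getD node []
          if lst = [] ∨ lst.getLast? ≠ some i then occ.insert node (lst ++ [i]) else occ) occ).getD x [])
        = if x ∈ cl ∧ (occ.getD x []).getLast? ≠ some i
          then occ.getD x [] ++ [i] else occ.getD x [] := by
  intro cl
  induction cl with
  | nil => intro occ; simp
  | cons node rest ih =>
    intro occ
    simp only [List.foldl_cons]
    by_cases hnx : node = x
    · subst hnx
      by_cases hl : (occ.getD node ([] : List Int)).getLast? = some i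
      · have hnil : occ.getD node ([] : List Int) ≠ [] := by
          intro h0; rw [h0] at hl; simp at hl
        rw [if_neg (by simp [hl, hnil]), ih]
        simp [hl]
      · rw [if_pos (by simp [hl]), ih]
        simp [hl]
    · have hxn : x ≠ node := fun h => hnx h.symm
      by_cases hc : (occ.getD node ([] : List Int) = [] ∨ (occ.getD node ([] : List Int)).getLast? ≠ some i)
      · rw [if_pos (by simpa using hc), ih]
        simp [PySem.Dict.getD_insert, hxn]
      · rw [if_neg (by simpa using hc), ih]
        simp [hxn]

theorem pv_occ_outer (x : Int) :
    ∀ (cls : List (List Int)) (s : Int) (occ : PySem.Dict Int (List Int)),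
      (∀ y v, v ∈ occ.getD y ([] : List Int) → v < s) →
      (((PySem.List.enumerate cls s).foldl
          (fun occ p => p.2.foldl (fun occ node =>
            let lst := occ.getD node []
            if lst = [] ∨ lst.getLast? ≠ some p.1 then occ.insert node (lst ++ [p.1]) else occ) occ) occ).getD x [])
        = occ.getD x [] ++ ((PySem.List.enumerate cls s).filter (fun p => decide (x ∈ p.2))).map (·.1) := by
  intro cls
  induction cls with
  | nil => intro s occ h; simp [PySem.List.enumerate_nil]
  | cons cl cls ih =>
    intro s occ h
    rw [PySem.List.enumerate_cons, List.foldl_cons, List.filter_cons]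
    have hlast : ∀ y, (occ.getD y ([] : List Int)).getLast? ≠ some s := by
      intro y hsome
      exact absurd (h y s (List.mem_of_getLast? hsome)) (by omega)
    have hstep := pv_occ_inner s x cl occ
    have h' : ∀ y v, v ∈ ((cl.foldl (fun occ node =>
          let lst := occ.getD node []
          if lst = [] ∨ lst.getLast? ≠ some s then occ.insert node (lst ++ [s]) else occ) occ)).getD y ([] : List Int) → v < s + 1 := by
      intro y v hv
      rw [pv_occ_inner s y cl occ] at hv
      by_cases hy : y ∈ cl ∧ (occ.getD y ([] : List Int)).getLast? ≠ some s
      · rw [if_pos hy] at hv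
        rcases List.mem_append.1 hv with hv | hv
        · exact lt_trans (h y v hv) (by omega)
        · simp at hv; omega
      · rw [if_neg hy] at hv
        exact lt_trans (h y v hv) (by omega)
    rw [ih (s + 1) _ h', hstep]
    by_cases hx : x ∈ cl
    · rw [if_pos ⟨hx, hlast x⟩]
      simp [hx]
    · rw [if_neg (by simp [hx])]
      simp [hx]

-- the inverted index: occ[x] is the ascending list of clique indices containing x
def pvOccList (cliques : List (List Int)) (x : Int) : List Int :=
  (PySem.List.pyRange 0 (cliques.length : Int) 1).filter
    (fun j => decide (x ∈ PySem.List.pyGetD cliques j []))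

theorem pv_occ_getD (cliques : List (List Int)) (x : Int) :
    (pvBOcc cliques).getD x [] = pvOccList cliques x := by
  rw [pvBOcc, pv_occ_outer x cliques 0 PySem.Dict.empty (by simp)]
  rw [PySem.List.enumerate_eq_map_pyRange cliques [], List.filter_map, List.map_map]
  simp [pvOccList, Function.comp_def]

theorem pv_occ_keys_nodup (cliques : List (List Int)) : (pvBOcc cliques).keys.Nodup := by
  rw [pvBOcc]
  have hinner : ∀ (i : Int) (cl : List Int) (occ : PySem.Dict Int (List Int)), occ.keys.Nodup →
      (cl.foldl (fun occ node =>
        let lst := occ.getD node []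
        if lst = [] ∨ lst.getLast? ≠ some i then occ.insert node (lst ++ [i]) else occ) occ).keys.Nodup := by
    intro i cl
    induction cl with
    | nil => intro occ h; exact h
    | cons node rest ih =>
      intro occ h
      simp only [List.foldl_cons]
      split
      · exact ih _ (PySem.Dict.nodup_keys_insert _ _ _ h)
      · exact ih _ h
  have houter : ∀ (E : List (Int × List Int)) (occ : PySem.Dict Int (List Int)), occ.keys.Nodup →
      (E.foldl (fun occ p => p.2.foldl (fun occ node =>
        let lst := occ.getD node []
        if lst = [] ∨ lst.getLast? ≠ some p.1 then occ.insert node (lst ++ [p.1]) else occ) occ) occ).keys.Nodup := by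
    intro E
    induction E with
    | nil => intro occ h; exact h
    | cons p E ih => intro occ h; exact ih _ (hinner p.1 p.2 occ h)
  exact houter _ _ (by simp)

theorem pv_occ_values_mem (cliques : List (List Int)) (lst : List Int)
    (h : lst ∈ (pvBOcc cliques).values) : ∃ x, lst = pvOccList cliques x := by
  have : ∃ p ∈ (pvBOcc cliques).items, p.2 = lst := by
    simpa [PySem.Dict.values, List.mem_map] using h
  rcases this with ⟨⟨k, v⟩, hp, hv⟩
  subst hv
  refine ⟨k, ?_⟩
  have hg := PySem.Dict.get?_of_mem_items _ hp (pv_occ_keys_nodup cliques)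
  rw [← pv_occ_getD cliques k]
  exact (PySem.Dict.getD_of_get?_eq_some _ _ hg).symm

theorem pv_occ_values_mem' (cliques : List (List Int)) (x : Int)
    (h : pvOccList cliques x ≠ []) : pvOccList cliques x ∈ (pvBOcc cliques).values := by
  have hgetD := pv_occ_getD cliques x
  have hcont : (pvBOcc cliques).contains x = true := by
    by_contra hc
    exact h (by rw [← hgetD, PySem.Dict.getD_of_not_contains _ _ (by simpa using hc)])
  have hsome : ((pvBOcc cliques).get? x).isSome := by
    rw [← PySem.Dict.contains_eq_isSome_get?]; exact hcont
  rcases Option.isSome_iff_exists.1 hsome with ⟨v, hv⟩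
  have hveq : v = pvOccList cliques x := by
    rw [← hgetD]; exact (PySem.Dict.getD_of_get?_eq_some _ _ hv).symm
  have : (x, v) ∈ (pvBOcc cliques).items := PySem.Dict.mem_items_of_get?_eq_some _ hv
  rw [← hveq]
  simp only [PySem.Dict.values, List.mem_map]
  exact ⟨(x, v), this, rfl⟩

theorem pv_partners_step_mem (g : Int × Int → List Int) :
    ∀ (E : List (Int × Int)) (pd : PySem.Dict Int (PySem.Set Int)) (c i : Int),
      (i ∈ (E.foldl (fun pd q => pd.modify q.2 [] (fun s => PySem.Set.update s (g q))) pd).getD c ([] : PySem.Set Int))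
        ↔ i ∈ pd.getD c ([] : PySem.Set Int) ∨ ∃ q ∈ E, q.2 = c ∧ i ∈ g q := by
  intro E
  induction E with
  | nil => intro pd c i; simp
  | cons q E ih =>
    intro pd c i
    rw [List.foldl_cons, ih, PySem.Dict.getD_modify]
    by_cases hqc : c = q.2
    · rw [if_pos hqc]
      subst hqc
      simp only [PySem.Set.mem_update, List.mem_cons]
      constructor
      · rintro ((h | h) | ⟨q', hq', h2, h3⟩)
        · exact Or.inl h
        · exact Or.inr ⟨q, Or.inl rfl, rfl, h⟩
        · exact Or.inr ⟨q', Or.inr hq', h2, h3⟩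
      · rintro (h | ⟨q', (rfl | hq'), h2, h3⟩)
        · exact Or.inl (Or.inl h)
        · exact Or.inl (Or.inr h3)
        · exact Or.inr ⟨q', hq', h2, h3⟩
    · rw [if_neg hqc]
      simp only [List.mem_cons]
      constructor
      · rintro (h | ⟨q', hq', h2, h3⟩)
        · exact Or.inl h
        · exact Or.inr ⟨q', Or.inr hq', h2, h3⟩
      · rintro (h | ⟨q', (rfl | hq'), h2, h3⟩)
        · exact Or.inl h
        · exact absurd h2.symm hqc
        · exact Or.inr ⟨q', hq', h2, h3⟩

theorem pv_partners_step_nodup (g : Int × Int → List Int) :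
    ∀ (E : List (Int × Int)) (pd : PySem.Dict Int (PySem.Set Int)),
      (∀ c, (pd.getD c ([] : PySem.Set Int)).Nodup) →
      ∀ c, ((E.foldl (fun pd q => pd.modify q.2 [] (fun s => PySem.Set.update s (g q))) pd).getD c ([] : PySem.Set Int)).Nodup := by
  intro E
  induction E with
  | nil => intro pd h c; exact h c
  | cons q E ih =>
    intro pd h c
    rw [List.foldl_cons]
    refine ih _ (fun c' => ?_) c
    rw [PySem.Dict.getD_modify]
    split
    · exact PySem.Set.nodup_update _ _ (h q.2)
    · exact h c'

theorem pv_partners_mem (occ : PySem.Dict Int (List Int)) (c i : Int) :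
    i ∈ (pvBPartners occ).getD c ([] : PySem.Set Int)
      ↔ ∃ lst ∈ occ.values, ∃ q ∈ PySem.List.enumerate lst 0, q.2 = c ∧
          i ∈ PySem.List.slice lst (some (q.1 + 1)) none := by
  rw [pvBPartners]
  have main : ∀ (V : List (List Int)) (pd : PySem.Dict Int (PySem.Set Int)),
      i ∈ (V.foldl (fun pd lst =>
          (PySem.List.enumerate lst 0).foldl (fun pd q =>
            pd.modify q.2 [] (fun s => PySem.Set.update s (PySem.List.slice lst (some (q.1 + 1)) none))) pd) pd).getD c ([] : PySem.Set Int)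
        ↔ i ∈ pd.getD c ([] : PySem.Set Int) ∨ ∃ lst ∈ V, ∃ q ∈ PySem.List.enumerate lst 0, q.2 = c ∧
            i ∈ PySem.List.slice lst (some (q.1 + 1)) none := by
    intro V
    induction V with
    | nil => intro pd; simp
    | cons lst V ih =>
      intro pd
      rw [List.foldl_cons, ih, pv_partners_step_mem]
      simp only [List.mem_cons]
      constructor
      · rintro ((h | ⟨q, hq, h2, h3⟩) | ⟨l', hl', hq⟩)
        · exact Or.inl h
        · exact Or.inr ⟨lst, Or.inl rfl, q, hq, h2, h3⟩
        · exact Or.inr ⟨l', Or.inr hl', hq⟩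
      · rintro (h | ⟨l', (rfl | hl'), hq⟩)
        · exact Or.inl (Or.inl h)
        · exact Or.inl (Or.inr hq)
        · exact Or.inr ⟨l', hl', hq⟩
  rw [main]
  simp

theorem pv_partners_nodup (occ : PySem.Dict Int (List Int)) (c : Int) :
    ((pvBPartners occ).getD c ([] : PySem.Set Int)).Nodup := by
  rw [pvBPartners]
  have main : ∀ (V : List (List Int)) (pd : PySem.Dict Int (PySem.Set Int)),
      (∀ c', (pd.getD c' ([] : PySem.Set Int)).Nodup) →
      ∀ c', ((V.foldl (fun pd lst =>
          (PySem.List.enumerate lst 0).foldl (fun pd q =>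
            pd.modify q.2 [] (fun s => PySem.Set.update s (PySem.List.slice lst (some (q.1 + 1)) none))) pd) pd).getD c' ([] : PySem.Set Int)).Nodup := by
    intro V
    induction V with
    | nil => intro pd h c'; exact h c'
    | cons lst V ih =>
      intro pd h c'
      rw [List.foldl_cons]
      exact ih _ (pv_partners_step_nodup _ _ _ h) c'
  exact main _ _ (by simp) c

theorem pv_occList_pairwise (cliques : List (List Int)) (x : Int) :
    (pvOccList cliques x).Pairwise (· < ·) :=
  (PySem.List.pairwise_lt_pyRange_one _ _).filter _

theorem pv_mem_occList (cliques : List (List Int)) (x v : Int) :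
    v ∈ pvOccList cliques x ↔ (0 ≤ v ∧ v < (cliques.length : Int)) ∧ x ∈ PySem.List.pyGetD cliques v [] := by
  simp [pvOccList, PySem.List.mem_pyRange_one]

-- on a strictly increasing list, "some element equals c and i occurs later" is "c and i occur and c < i"
theorem pv_pairs_iff (L : List Int) (hL : L.Pairwise (· < ·)) (c i : Int) :
    (∃ (k : Nat) (h : k < L.length), L[k] = c ∧ i ∈ L.drop (k + 1)) ↔ (c ∈ L ∧ i ∈ L ∧ c < i) := by
  have hget := List.pairwise_iff_getElem.1 hL
  constructor
  · rintro ⟨k, hk, hkc, hi⟩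
    rcases List.mem_iff_getElem.1 hi with ⟨m, hm, hmi⟩
    rw [List.getElem_drop] at hmi
    have hlen : k + 1 + m < L.length := by
      have := hm; simp [List.length_drop] at this; omega
    refine ⟨hkc ▸ List.getElem_mem hk, List.mem_of_mem_drop hi, ?_⟩
    rw [← hkc, ← hmi]
    exact hget k (k + 1 + m) hk hlen (by omega)
  · rintro ⟨hc, hi, hlt⟩
    rcases List.mem_iff_getElem.1 hc with ⟨k, hk, hkc⟩
    rcases List.mem_iff_getElem.1 hi with ⟨m, hm, hmi⟩
    have hkm : k < m := by
      rcases lt_trichotomy k m with h | h | h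
      · exact h
      · subst h; rw [hkc] at hmi; omega
      · have := hget m k hm hk h; rw [hkc, hmi] at this; omega
    refine ⟨k, hk, hkc, ?_⟩
    rw [List.mem_iff_getElem]
    refine ⟨m - (k + 1), by simp [List.length_drop]; omega, ?_⟩
    rw [List.getElem_drop]
    have : k + 1 + (m - (k + 1)) = m := by omega
    simp only [this]
    exact hmi

theorem pv_enum_slice (lst : List Int) (c i : Int) :
    (∃ q ∈ PySem.List.enumerate lst 0, q.2 = c ∧ i ∈ PySem.List.slice lst (some (q.1 + 1)) none)
      ↔ ∃ (k : Nat) (h : k < lst.length), lst[k] = c ∧ i ∈ lst.drop (k + 1) := by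
  constructor
  · rintro ⟨q, hq, h2, h3⟩
    rcases (PySem.List.mem_enumerate_iff _ _ _).1 hq with ⟨k, hk, rfl⟩
    refine ⟨k, hk, by simpa using h2, ?_⟩
    have hcast : ((0 : Int) + (k : Int), lst[k]).1 + 1 = (((k + 1 : Nat) : Int)) := by push_cast; ring
    rw [hcast, PySem.List.slice_from _ (by positivity)] at h3
    simpa using h3
  · rintro ⟨k, hk, h2, h3⟩
    refine ⟨((0 : Int) + (k : Int), lst[k]), (PySem.List.mem_enumerate_iff _ _ _).2 ⟨k, hk, rfl⟩,
      by simpa using h2, ?_⟩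
    have hcast : ((0 : Int) + (k : Int), lst[k]).1 + 1 = (((k + 1 : Nat) : Int)) := by push_cast; ring
    rw [hcast, PySem.List.slice_from _ (by positivity)]
    simpa using h3

theorem pv_partners_char (cliques : List (List Int)) (c i : Int) :
    i ∈ (pvBPartners (pvBOcc cliques)).getD c ([] : PySem.Set Int)
      ↔ (0 ≤ c ∧ c < (cliques.length : Int)) ∧ (0 ≤ i ∧ i < (cliques.length : Int)) ∧ c < i ∧
          ∃ x, x ∈ PySem.List.pyGetD cliques c [] ∧ x ∈ PySem.List.pyGetD cliques i [] := by
  rw [pv_partners_mem]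
  constructor
  · rintro ⟨lst, hlst, hq⟩
    rcases pv_occ_values_mem _ _ hlst with ⟨x, rfl⟩
    rw [pv_enum_slice, pv_pairs_iff _ (pv_occList_pairwise cliques x)] at hq
    rcases hq with ⟨hc, hi, hlt⟩
    rw [pv_mem_occList] at hc hi
    exact ⟨hc.1, hi.1, hlt, x, hc.2, hi.2⟩
  · rintro ⟨hcb, hib, hlt, x, hxc, hxi⟩
    have hc : c ∈ pvOccList cliques x := (pv_mem_occList _ _ _).2 ⟨hcb, hxc⟩
    have hi : i ∈ pvOccList cliques x := (pv_mem_occList _ _ _).2 ⟨hib, hxi⟩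
    refine ⟨pvOccList cliques x, pv_occ_values_mem' _ _ (List.ne_nil_of_mem hc), ?_⟩
    rw [pv_enum_slice, pv_pairs_iff _ (pv_occList_pairwise cliques x)]
    exact ⟨hc, hi, hlt⟩

theorem pv_sorted_partners (cliques : List (List Int)) (c : Int)
    (h0 : 0 ≤ c) (hn : c < (cliques.length : Int)) :
    PySem.List.sorted ((pvBPartners (pvBOcc cliques)).getD c ([] : PySem.Set Int)) (fun x => x) false
      = (PySem.List.pyRange (c + 1) (cliques.length : Int) 1).filter
          (fun i => !(PySem.Set.inter (PySem.Set.ofList (PySem.List.pyGetD cliques c []))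
              (PySem.Set.ofList (PySem.List.pyGetD cliques i []))).isEmpty) := by
  apply PySem.List.sorted_eq_of_perm_of_pairwise_lt
  · rw [List.perm_ext_iff_of_nodup
      (((PySem.List.pairwise_lt_pyRange_one _ _).filter _).imp ne_of_lt)
      (pv_partners_nodup _ _)]
    intro i
    rw [List.mem_filter, PySem.List.mem_pyRange_one, pv_partners_char]
    have hbridge : ((PySem.Set.ofList (PySem.List.pyGetD cliques c [])).inter
          (PySem.Set.ofList (PySem.List.pyGetD cliques i []))).isEmpty = false
        ↔ ∃ x ∈ PySem.List.pyGetD cliques c [], x ∈ PySem.List.pyGetD cliques i [] := by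
      rw [List.isEmpty_eq_false_iff_exists_mem]
      simp [PySem.Set.mem_inter, PySem.Set.mem_ofList]
    simp only [Bool.not_eq_true', hbridge]
    constructor
    · rintro ⟨⟨hi1, hi2⟩, hx⟩
      exact ⟨⟨h0, hn⟩, ⟨by omega, hi2⟩, by omega, hx⟩
    · rintro ⟨-, ⟨-, hi2⟩, hlt, hx⟩
      exact ⟨⟨by omega, hi2⟩, hx⟩
  · exact (PySem.List.pairwise_lt_pyRange_one _ _).filter _


def pvG (cliques : List (List Int)) (bond : Int × Int) : Option (Int × Int) :=
  match (pvBLast cliques).get? bond.1, (pvBLast cliques).get? bond.2 with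
  | some x, some y => some (x, y)
  | _, _ => none

theorem pv_foldl_opt {γ δ : Type} (h : γ → Option δ) :
    ∀ (l : List γ) (acc : List δ),
      l.foldl (fun es b => es ++ (h b).toList) acc = acc ++ l.filterMap h := by
  intro l
  induction l with
  | nil => intro acc; simp
  | cons b l ih =>
    intro acc
    rw [List.foldl_cons, List.filterMap_cons]
    cases hb : h b <;> simp [ih]

def pvCanon (cliques : List (List Int)) (res_list : List (Int × Int)) : List (Int × Int) :=
  res_list.filterMap (pvG cliques) ++
    (PySem.List.pyRange 0 (cliques.length : Int) 1).flatMap (fun c =>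
      ((PySem.List.pyRange (c + 1) (cliques.length : Int) 1).filter
        (fun i => !(PySem.Set.inter (PySem.Set.ofList (PySem.List.pyGetD cliques c []))
            (PySem.Set.ofList (PySem.List.pyGetD cliques i []))).isEmpty)).map (fun i => (c, i)))

theorem pv_A_canon (cliques : List (List Int)) (res_list : List (Int × Int)) :
    find_edges cliques res_list = pvCanon cliques res_list := by
  unfold find_edges pvCanon
  dsimp only
  rw [PySem.List.foldl_congr_mem res_list _
    (fun (edges : List (Int × Int)) (bond : Int × Int) =>
      edges ++ (pvG cliques bond).toList) _ ?hcongr]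
  case hcongr =>
    intro acc bond _
    rw [pv_foldl_pair (fun acc c => if (PySem.List.pyGetD cliques c []).contains bond.1 then some c else acc)
      (fun acc c => if (PySem.List.pyGetD cliques c []).contains bond.2 then some c else acc),
      pv_bond_lookup, pv_bond_lookup]
    cases h1 : (pvBLast cliques).get? bond.1 <;> cases h2 : (pvBLast cliques).get? bond.2 <;>
      simp [pvG, h1, h2]
  rw [pv_foldl_opt (pvG cliques) res_list []]
  rw [PySem.List.foldl_congr_mem (PySem.List.pyRange 0 (cliques.length : Int) 1) _
    (fun (edges : List (Int × Int)) (c : Int) =>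
      edges ++ ((PySem.List.pyRange (c + 1) (cliques.length : Int) 1).filter
        (fun i => !(PySem.Set.inter (PySem.Set.ofList (PySem.List.pyGetD cliques c []))
            (PySem.Set.ofList (PySem.List.pyGetD cliques i []))).isEmpty)).map (fun i => (c, i))) _ ?h2]
  case h2 =>
    intro acc c _
    rw [PySem.List.foldl_append_if]
  rw [PySem.List.foldl_append_eq_flatMap]
  simp


theorem pv_B_canon (cliques : List (List Int)) (res_list : List (Int × Int)) :
    find_edges_alt cliques res_list = pvCanon cliques res_list := by
  unfold find_edges_alt pvCanon
  dsimp only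
  rw [List.filterMap_congr (g := pvG cliques) ?hg]
  case hg =>
    intro bond _
    cases h1 : (pvBLast cliques).get? bond.1 <;> cases h2 : (pvBLast cliques).get? bond.2 <;>
      simp [pvG, h1, h2, PySem.Dict.contains_eq_isSome_get?, PySem.Dict.getD_eq_get?_getD]
  rw [PySem.List.foldl_congr_mem (PySem.List.pyRange 0 (cliques.length : Int) 1) _
    (fun (edges : List (Int × Int)) (c : Int) =>
      edges ++ ((PySem.List.pyRange (c + 1) (cliques.length : Int) 1).filter
        (fun i => !(PySem.Set.inter (PySem.Set.ofList (PySem.List.pyGetD cliques c []))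
            (PySem.Set.ofList (PySem.List.pyGetD cliques i []))).isEmpty)).map (fun i => (c, i))) _ ?h2]
  case h2 =>
    intro acc c hc
    rcases PySem.List.mem_pyRange_one.1 hc with ⟨h0, hn⟩
    rw [PySem.List.foldl_append_singleton_eq_map, pv_sorted_partners cliques c h0 hn]
  rw [PySem.List.foldl_append_eq_flatMap]

-- ===== VERDICT (by name: the statement is the Claim_ definition above) =====
theorem find_edges_spec : Claim_equal_find_edges := by
  intro cliques res_list _
  unfold Spec_find_edges
  rw [pv_A_canon, pv_B_canon]
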